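-- pv_equiv track=rewrite | github.com/rociomer/advent-of-code | day-24/day-24-part-2-solution.py | parse_tile_flips
-- ===== SOURCE A (Python) =====
-- def parse_tile_flips(flipping_instructions : list) -> list:
--     """Parses the input tile flipping instructions, converting them from a list of
--     strings to a list of integers, where integers are used to denote the tiles as
--     folows: 0:e, 1:se, 2:sw, 3:w, 4:nw 5:ne
--     """
--     flipping_instructions_int = []
--     for instructions in flipping_instructions:
--         instructions = instructions.replace("se", "1")
--         instructions = instructions.replace("sw", "2")
--         instructions = instructions.replace("nw", "4")
--         instructions = instructions.replace("ne", "5")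
--         instructions = instructions.replace("e", "0")
--         instructions = instructions.replace("w", "3")
--         flipping_instructions_int.append([int(i) for i in instructions])
--
--     return flipping_instructions_int
-- ===== SOURCE B (Python) =====
-- def _scan(s):
--     # one left-to-right pass: a tiny state machine over the token grammar
--     out = []
--     i = 0
--     n = len(s)
--     while i < n:
--         c = s[i]
--         if c == 'e':
--             out.append(0); i += 1
--         elif c == 'w':
--             out.append(3); i += 1
--         elif c == 's' and s[i+1:i+2] == 'e':
--             out.append(1); i += 2
--         elif c == 's' and s[i+1:i+2] == 'w':
--             out.append(2); i += 2
--         elif c == 'n' and s[i+1:i+2] == 'w':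
--             out.append(4); i += 2
--         elif c == 'n' and s[i+1:i+2] == 'e':
--             out.append(5); i += 2
--         else:
--             out.append(int(c)); i += 1
--     return out
--
--
-- def parse_tile_flips(flipping_instructions : list) -> list:
--     return [_scan(s) for s in flipping_instructions]
-- ===== Notes on version B (the rewrite author's own statement) =====
-- stated objective: alternative
-- what changed: B replaces A's six sequential whole-string .replace substitution passes (plus a final per-character int() pass) by a single left-to-right token-scanner pass over each instruction string that emits the integer for each token directly.
import Mathlib
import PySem

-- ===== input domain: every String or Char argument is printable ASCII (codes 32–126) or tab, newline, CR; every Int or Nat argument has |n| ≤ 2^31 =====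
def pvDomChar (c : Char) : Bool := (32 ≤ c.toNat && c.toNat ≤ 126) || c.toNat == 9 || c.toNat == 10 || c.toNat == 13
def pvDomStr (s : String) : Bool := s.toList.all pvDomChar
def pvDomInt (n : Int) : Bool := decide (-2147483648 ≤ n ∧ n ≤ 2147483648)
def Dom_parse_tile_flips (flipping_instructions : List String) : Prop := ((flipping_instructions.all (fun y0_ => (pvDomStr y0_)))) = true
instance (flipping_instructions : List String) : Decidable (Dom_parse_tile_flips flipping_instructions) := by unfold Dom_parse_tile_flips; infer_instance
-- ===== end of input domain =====

-- B replaces A's six sequential whole-string .replace passes by a single left-to-right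
-- scan of each instruction string (one token state machine per string); same return value.

-- ===== PORT A =====
-- int(i) for a one-character string i: PySem.Int.ofChars? [c]; none = ValueError,
-- excluded by Pre_, so the total form .getD 0 is exact on the admitted inputs.
def parse_tile_flips (flipping_instructions : List String) : List (List Int) :=
  flipping_instructions.foldl (fun flipping_instructions_int instructions =>
    let i1 := PySem.Str.replace instructions "se" "1"
    let i2 := PySem.Str.replace i1 "sw" "2"
    let i3 := PySem.Str.replace i2 "nw" "4"
    let i4 := PySem.Str.replace i3 "ne" "5"
    let i5 := PySem.Str.replace i4 "e" "0"
    let i6 := PySem.Str.replace i5 "w" "3"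
    flipping_instructions_int ++ [i6.toList.map (fun c => (PySem.Int.ofChars? [c]).getD 0)]) []

-- ===== PORT B =====
-- the per-string while-loop of Source B's _scan, as the obvious structural recursion on the
-- characters; the final else branch is int(c) (ValueError = none, excluded by Pre_).
def pvScan : List Char → List Int
  | [] => []
  | 'e' :: t => 0 :: pvScan t
  | 'w' :: t => 3 :: pvScan t
  | 's' :: 'e' :: t => 1 :: pvScan t
  | 's' :: 'w' :: t => 2 :: pvScan t
  | 'n' :: 'w' :: t => 4 :: pvScan t
  | 'n' :: 'e' :: t => 5 :: pvScan t
  | c :: t => (PySem.Int.ofChars? [c]).getD 0 :: pvScan t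

def parse_tile_flips_alt (flipping_instructions : List String) : List (List Int) :=
  flipping_instructions.map (fun s => pvScan s.toList)

-- ===== PRECONDITION & SPEC =====
-- pvTok: membership in the token grammar (se|sw|nw|ne|e|w|digit)* — the string is a
-- concatenation of such tokens (the decomposition is unique: 's'/'n' always pair with a
-- following 'e'/'w').  This is a closed-form shape condition on the input, not a
-- simulation of either port: A runs six whole-string substitution passes instead.
def pvTok : List Char → Bool
  | [] => true
  | 'e' :: t => pvTok t
  | 'w' :: t => pvTok t
  | 's' :: 'e' :: t => pvTok t
  | 's' :: 'w' :: t => pvTok t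
  | 'n' :: 'w' :: t => pvTok t
  | 'n' :: 'e' :: t => pvTok t
  | c :: t => c.isDigit && pvTok t

-- Pre_ excludes exactly the inputs on which A raises ValueError (a character left over
-- after the six substitutions is not a decimal digit, so int() fails).
def Pre_parse_tile_flips (flipping_instructions : List String) : Prop :=
  ∀ s ∈ flipping_instructions, pvTok s.toList = true
instance (flipping_instructions : List String) : Decidable (Pre_parse_tile_flips flipping_instructions) := by unfold Pre_parse_tile_flips; infer_instance

def pvWitness_parse_tile_flips : List String := ["senwne", "ew7", ""]

def Spec_parse_tile_flips (flipping_instructions : List String) (out : List (List Int)) : Prop := out = parse_tile_flips_alt flipping_instructions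
instance (flipping_instructions : List String) (out : List (List Int)) : Decidable (Spec_parse_tile_flips flipping_instructions out) := by unfold Spec_parse_tile_flips; infer_instance

-- ===== CLAIM (what is proved, stated in full; the proofs are below) =====
def Claim_equal_parse_tile_flips : Prop := ∀ (flipping_instructions : List String), Dom_parse_tile_flips flipping_instructions → Pre_parse_tile_flips flipping_instructions → Spec_parse_tile_flips flipping_instructions (parse_tile_flips flipping_instructions)

-- ===== LEMMAS AND PROOFS =====

-- a fuel-free reading of PySem.Chars.replace: repF with enough fuel
def repF : Nat → List Char → List Char → List Char → List Char
  | 0, _, _, l => l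
  | f + 1, old, new, l =>
    if old.isPrefixOf l then new ++ repF f old new (l.drop old.length)
    else
      match l with
      | [] => []
      | c :: t => c :: repF f old new t

theorem go_acc (old new : List Char) : ∀ (f : Nat) (l acc : List Char),
    PySem.Chars.replace.go old new f l acc = acc.reverse ++ PySem.Chars.replace.go old new f l [] := by
  intro f
  induction f with
  | zero => intro l acc; simp [PySem.Chars.replace.go]
  | succ f ih =>
      intro l acc
      cases l with
      | nil => simp [PySem.Chars.replace.go]
      | cons c t =>
          simp only [PySem.Chars.replace.go]
          split
          · rw [ih (List.drop old.length (c :: t)) (new.reverse ++ acc),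
                ih (List.drop old.length (c :: t)) (new.reverse ++ [])]
            simp
          · rw [ih t (c :: acc), ih t (c :: [])]
            simp

theorem go_eq_repF (old new : List Char) (hold : old ≠ []) : ∀ (f : Nat) (l : List Char),
    PySem.Chars.replace.go old new f l [] = repF f old new l := by
  intro f
  induction f with
  | zero => intro l; simp [PySem.Chars.replace.go, repF]
  | succ f ih =>
      intro l
      cases l with
      | nil =>
          have hpre : old.isPrefixOf ([] : List Char) = false := by
            cases old with
            | nil => exact absurd rfl hold
            | cons a b => rfl
          simp [PySem.Chars.replace.go, repF, hpre]
      | cons c t =>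
          simp only [PySem.Chars.replace.go, repF]
          split
          · rw [go_acc, ih]; simp
          · rw [go_acc, ih]; simp

theorem repF_congr (old new : List Char) (hold : old ≠ []) : ∀ (f g : Nat) (l : List Char),
    l.length ≤ f → l.length ≤ g → repF f old new l = repF g old new l := by
  intro f
  induction f with
  | zero =>
      intro g l hf hg
      have : l = [] := by cases l <;> simp_all
      subst this
      cases g with
      | zero => rfl
      | succ g =>
          have hpre : old.isPrefixOf ([] : List Char) = false := by
            cases old with
            | nil => exact absurd rfl hold
            | cons a b => rfl
          simp [repF, hpre]
  | succ f ih =>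
      intro g l hf hg
      cases g with
      | zero =>
          have : l = [] := by cases l <;> simp_all
          subst this
          have hpre : old.isPrefixOf ([] : List Char) = false := by
            cases old with
            | nil => exact absurd rfl hold
            | cons a b => rfl
          simp [repF, hpre]
      | succ g =>
          cases l with
          | nil =>
              have hpre : old.isPrefixOf ([] : List Char) = false := by
                cases old with
                | nil => exact absurd rfl hold
                | cons a b => rfl
              simp [repF, hpre]
          | cons c t =>
              have hk : 1 ≤ old.length := by cases old with | nil => exact absurd rfl hold | cons a b => simp
              simp only [repF]
              split
              · rw [ih g (List.drop old.length (c :: t))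
                    (by simp at hf ⊢; omega) (by simp at hg ⊢; omega)]
              · rw [ih g t (by simp at hf ⊢; omega) (by simp at hg ⊢; omega)]

def Rrep (old new l : List Char) : List Char := repF l.length old new l

theorem replace_eq_Rrep (old new l : List Char) (hold : old ≠ []) :
    PySem.Chars.replace l old new = Rrep old new l := by
  have : old.isEmpty = false := by cases old with | nil => exact absurd rfl hold | cons a b => rfl
  simp [PySem.Chars.replace, this, go_eq_repF old new hold, Rrep]

theorem Rrep_cons_ne (old new : List Char) (c : Char) (t : List Char)
    (h : old.isPrefixOf (c :: t) = false) : Rrep old new (c :: t) = c :: Rrep old new t := by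
  simp [Rrep, repF, h]

theorem Rrep_prefix (old new l : List Char) (hold : old ≠ [])
    (h : old.isPrefixOf l = true) :
    Rrep old new l = new ++ Rrep old new (l.drop old.length) := by
  cases l with
  | nil =>
      cases old with
      | nil => exact absurd rfl hold
      | cons a b => simp [List.isPrefixOf] at h
  | cons c t =>
      have hk : 1 ≤ old.length := by cases old with | nil => exact absurd rfl hold | cons a b => simp
      simp only [Rrep, List.length_cons, repF, h, if_true]
      exact congrArg (new ++ ·) (repF_congr old new hold t.length ((List.drop old.length (c :: t)).length) _
          (by simp; omega) (le_refl _))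

-- the six R-passes of A, in A's order
def pvPipe (l : List Char) : List Char :=
  Rrep ['w'] ['3'] (Rrep ['e'] ['0'] (Rrep ['n','e'] ['5'] (Rrep ['n','w'] ['4']
    (Rrep ['s','w'] ['2'] (Rrep ['s','e'] ['1'] l)))))

theorem pipe_e (t : List Char) : pvPipe ('e'::t) = '0' :: pvPipe t := by
  simp only [pvPipe]
  rw [Rrep_cons_ne ['s','e'] ['1'] 'e' t (by simp [List.isPrefixOf])]
  rw [Rrep_cons_ne ['s','w'] ['2'] 'e' _ (by simp [List.isPrefixOf])]
  rw [Rrep_cons_ne ['n','w'] ['4'] 'e' _ (by simp [List.isPrefixOf])]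
  rw [Rrep_cons_ne ['n','e'] ['5'] 'e' _ (by simp [List.isPrefixOf])]
  rw [Rrep_prefix ['e'] ['0'] _ (by simp) (by simp [List.isPrefixOf])]
  simp only [List.length_singleton, List.drop_succ_cons, List.drop_zero, List.singleton_append]
  rw [Rrep_cons_ne ['w'] ['3'] '0' _ (by simp [List.isPrefixOf])]

theorem pipe_w (t : List Char) : pvPipe ('w'::t) = '3' :: pvPipe t := by
  simp only [pvPipe]
  rw [Rrep_cons_ne ['s','e'] ['1'] 'w' t (by simp [List.isPrefixOf])]
  rw [Rrep_cons_ne ['s','w'] ['2'] 'w' _ (by simp [List.isPrefixOf])]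
  rw [Rrep_cons_ne ['n','w'] ['4'] 'w' _ (by simp [List.isPrefixOf])]
  rw [Rrep_cons_ne ['n','e'] ['5'] 'w' _ (by simp [List.isPrefixOf])]
  rw [Rrep_cons_ne ['e'] ['0'] 'w' _ (by simp [List.isPrefixOf])]
  rw [Rrep_prefix ['w'] ['3'] _ (by simp) (by simp [List.isPrefixOf])]
  simp only [List.length_singleton, List.drop_succ_cons, List.drop_zero, List.singleton_append]

theorem pipe_se (t : List Char) : pvPipe ('s'::'e'::t) = '1' :: pvPipe t := by
  simp only [pvPipe]
  rw [Rrep_prefix ['s','e'] ['1'] _ (by simp) (by simp [List.isPrefixOf])]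
  simp only [List.length_cons, List.length_nil, List.drop_succ_cons,
    List.drop_zero, List.singleton_append]
  rw [Rrep_cons_ne ['s','w'] ['2'] '1' _ (by simp [List.isPrefixOf])]
  rw [Rrep_cons_ne ['n','w'] ['4'] '1' _ (by simp [List.isPrefixOf])]
  rw [Rrep_cons_ne ['n','e'] ['5'] '1' _ (by simp [List.isPrefixOf])]
  rw [Rrep_cons_ne ['e'] ['0'] '1' _ (by simp [List.isPrefixOf])]
  rw [Rrep_cons_ne ['w'] ['3'] '1' _ (by simp [List.isPrefixOf])]

theorem pipe_sw (t : List Char) : pvPipe ('s'::'w'::t) = '2' :: pvPipe t := by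
  simp only [pvPipe]
  rw [Rrep_cons_ne ['s','e'] ['1'] 's' ('w'::t) (by simp [List.isPrefixOf])]
  rw [Rrep_cons_ne ['s','e'] ['1'] 'w' t (by simp [List.isPrefixOf])]
  rw [Rrep_prefix ['s','w'] ['2'] _ (by simp) (by simp [List.isPrefixOf])]
  simp only [List.length_cons, List.length_nil, List.drop_succ_cons,
    List.drop_zero, List.singleton_append]
  rw [Rrep_cons_ne ['n','w'] ['4'] '2' _ (by simp [List.isPrefixOf])]
  rw [Rrep_cons_ne ['n','e'] ['5'] '2' _ (by simp [List.isPrefixOf])]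
  rw [Rrep_cons_ne ['e'] ['0'] '2' _ (by simp [List.isPrefixOf])]
  rw [Rrep_cons_ne ['w'] ['3'] '2' _ (by simp [List.isPrefixOf])]

theorem pipe_nw (t : List Char) : pvPipe ('n'::'w'::t) = '4' :: pvPipe t := by
  simp only [pvPipe]
  rw [Rrep_cons_ne ['s','e'] ['1'] 'n' ('w'::t) (by simp [List.isPrefixOf])]
  rw [Rrep_cons_ne ['s','e'] ['1'] 'w' t (by simp [List.isPrefixOf])]
  rw [Rrep_cons_ne ['s','w'] ['2'] 'n' _ (by simp [List.isPrefixOf])]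
  rw [Rrep_cons_ne ['s','w'] ['2'] 'w' _ (by simp [List.isPrefixOf])]
  rw [Rrep_prefix ['n','w'] ['4'] _ (by simp) (by simp [List.isPrefixOf])]
  simp only [List.length_cons, List.length_nil, List.drop_succ_cons,
    List.drop_zero, List.singleton_append]
  rw [Rrep_cons_ne ['n','e'] ['5'] '4' _ (by simp [List.isPrefixOf])]
  rw [Rrep_cons_ne ['e'] ['0'] '4' _ (by simp [List.isPrefixOf])]
  rw [Rrep_cons_ne ['w'] ['3'] '4' _ (by simp [List.isPrefixOf])]

theorem pipe_ne (t : List Char) : pvPipe ('n'::'e'::t) = '5' :: pvPipe t := by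
  simp only [pvPipe]
  rw [Rrep_cons_ne ['s','e'] ['1'] 'n' ('e'::t) (by simp [List.isPrefixOf])]
  rw [Rrep_cons_ne ['s','e'] ['1'] 'e' t (by simp [List.isPrefixOf])]
  rw [Rrep_cons_ne ['s','w'] ['2'] 'n' _ (by simp [List.isPrefixOf])]
  rw [Rrep_cons_ne ['s','w'] ['2'] 'e' _ (by simp [List.isPrefixOf])]
  rw [Rrep_cons_ne ['n','w'] ['4'] 'n' _ (by simp [List.isPrefixOf])]
  rw [Rrep_cons_ne ['n','w'] ['4'] 'e' _ (by simp [List.isPrefixOf])]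
  rw [Rrep_prefix ['n','e'] ['5'] _ (by simp) (by simp [List.isPrefixOf])]
  simp only [List.length_cons, List.length_nil, List.drop_succ_cons,
    List.drop_zero, List.singleton_append]
  rw [Rrep_cons_ne ['e'] ['0'] '5' _ (by simp [List.isPrefixOf])]
  rw [Rrep_cons_ne ['w'] ['3'] '5' _ (by simp [List.isPrefixOf])]

theorem pipe_other (c : Char) (t : List Char) (hs : c ≠ 's') (hn : c ≠ 'n')
    (he : c ≠ 'e') (hw : c ≠ 'w') : pvPipe (c::t) = c :: pvPipe t := by
  simp only [pvPipe]
  rw [Rrep_cons_ne ['s','e'] ['1'] c t (by simp [List.isPrefixOf, Ne.symm hs])]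
  rw [Rrep_cons_ne ['s','w'] ['2'] c _ (by simp [List.isPrefixOf, Ne.symm hs])]
  rw [Rrep_cons_ne ['n','w'] ['4'] c _ (by simp [List.isPrefixOf, Ne.symm hn])]
  rw [Rrep_cons_ne ['n','e'] ['5'] c _ (by simp [List.isPrefixOf, Ne.symm hn])]
  rw [Rrep_cons_ne ['e'] ['0'] c _ (by simp [List.isPrefixOf, Ne.symm he])]
  rw [Rrep_cons_ne ['w'] ['3'] c _ (by simp [List.isPrefixOf, Ne.symm hw])]

theorem pvMain (l : List Char) (h : pvTok l = true) :
    (pvPipe l).map (fun c => (PySem.Int.ofChars? [c]).getD 0) = pvScan l := by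
  induction l using pvScan.induct with
  | case1 => rfl
  | case2 t ih =>
      simp [pvTok] at h
      have hv : (PySem.Int.ofChars? ['0']).getD 0 = (0 : Int) := by decide
      simp [pipe_e, pvScan, ih h, hv]
  | case3 t ih =>
      simp [pvTok] at h
      have hv : (PySem.Int.ofChars? ['3']).getD 0 = (3 : Int) := by decide
      simp [pipe_w, pvScan, ih h, hv]
  | case4 t ih =>
      simp [pvTok] at h
      have hv : (PySem.Int.ofChars? ['1']).getD 0 = (1 : Int) := by decide
      simp [pipe_se, pvScan, ih h, hv]
  | case5 t ih =>
      simp [pvTok] at h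
      have hv : (PySem.Int.ofChars? ['2']).getD 0 = (2 : Int) := by decide
      simp [pipe_sw, pvScan, ih h, hv]
  | case6 t ih =>
      simp [pvTok] at h
      have hv : (PySem.Int.ofChars? ['4']).getD 0 = (4 : Int) := by decide
      simp [pipe_nw, pvScan, ih h, hv]
  | case7 t ih =>
      simp [pvTok] at h
      have hv : (PySem.Int.ofChars? ['5']).getD 0 = (5 : Int) := by decide
      simp [pipe_ne, pvScan, ih h, hv]
  | case8 c t h1 h2 h3 h4 h5 h6 ih =>
      simp [pvTok] at h
      have hdig := h.1
      have hs : c ≠ 's' := fun e => by rw [e] at hdig; simp at hdig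
      have hn : c ≠ 'n' := fun e => by rw [e] at hdig; simp at hdig
      have he : c ≠ 'e' := fun e => by rw [e] at hdig; simp at hdig
      have hw : c ≠ 'w' := fun e => by rw [e] at hdig; simp at hdig
      rw [pipe_other c t hs hn he hw]
      simp [pvScan, ih h.2]

-- ===== VERDICT (by name: the statement is the Claim_ definition above) =====
theorem toList_se : "se".toList = ['s','e'] := by decide
theorem toList_sw : "sw".toList = ['s','w'] := by decide
theorem toList_nw : "nw".toList = ['n','w'] := by decide
theorem toList_ne : "ne".toList = ['n','e'] := by decide
theorem toList_e : "e".toList = ['e'] := by decide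
theorem toList_w : "w".toList = ['w'] := by decide
theorem toList_1 : "1".toList = ['1'] := by decide
theorem toList_2 : "2".toList = ['2'] := by decide
theorem toList_4 : "4".toList = ['4'] := by decide
theorem toList_5 : "5".toList = ['5'] := by decide
theorem toList_0 : "0".toList = ['0'] := by decide
theorem toList_3 : "3".toList = ['3'] := by decide

theorem parse_tile_flips_spec : Claim_equal_parse_tile_flips := by
  intro fi hdom hpre
  show List.foldl (fun flipping_instructions_int instructions =>
      flipping_instructions_int ++ [List.map (fun c => (PySem.Int.ofChars? [c]).getD 0)
        (PySem.Str.replace (PySem.Str.replace (PySem.Str.replace (PySem.Str.replace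
          (PySem.Str.replace (PySem.Str.replace instructions "se" "1") "sw" "2") "nw" "4")
          "ne" "5") "e" "0") "w" "3").toList]) [] fi
    = List.map (fun s => pvScan s.toList) fi
  rw [PySem.List.foldl_append_singleton_eq_map
    (fun instructions => List.map (fun c => (PySem.Int.ofChars? [c]).getD 0)
      (PySem.Str.replace (PySem.Str.replace (PySem.Str.replace (PySem.Str.replace
        (PySem.Str.replace (PySem.Str.replace instructions "se" "1") "sw" "2") "nw" "4")
        "ne" "5") "e" "0") "w" "3").toList) fi ([]), List.nil_append]
  apply List.map_congr_left
  intro s hs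
  have htok := hpre s hs
  simp only [PySem.Str.toList_replace, toList_se, toList_sw, toList_nw, toList_ne,
    toList_e, toList_w, toList_1, toList_2, toList_4, toList_5, toList_0, toList_3]
  rw [replace_eq_Rrep ['s','e'] ['1'] _ (by simp),
      replace_eq_Rrep ['s','w'] ['2'] _ (by simp),
      replace_eq_Rrep ['n','w'] ['4'] _ (by simp),
      replace_eq_Rrep ['n','e'] ['5'] _ (by simp),
      replace_eq_Rrep ['e'] ['0'] _ (by simp),
      replace_eq_Rrep ['w'] ['3'] _ (by simp)]
  exact pvMain s.toList htok
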